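-- pv_equiv track=rewrite | github.com/JudyXian/GeVer | refinement_bird/sql2nl.py | simpleCompose
-- ===== SOURCE A (Python) =====
-- def simpleCompose(subs):
--     res = ''
--     categories = ['select', 'from', 'where', 'group', 'having', 'order']
--     # 6 categories
--     subexpression_dict = {
--         # 'select': '',
--         # 'from': '',
--         # 'where': '',
--         # 'group': '',
--         # 'having': '',
--         # 'order': '',
--     }
--     for sub in subs:
--         if sub.lower().startswith('select ') and 'select' not in subexpression_dict.keys():
--             subexpression_dict['select'] = sub
--         elif sub.lower().startswith('from ') and 'from' not in subexpression_dict.keys():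
--             subexpression_dict['from'] = sub
--         elif sub.lower().startswith('where ') and 'where' not in subexpression_dict.keys():
--             subexpression_dict['where'] = sub
--         elif sub.lower().startswith('group by ') and 'group' not in subexpression_dict.keys():
--             subexpression_dict['group'] = sub
--         elif sub.lower().startswith('having ') and 'having' not in subexpression_dict.keys():
--             subexpression_dict['having'] = sub
--         elif sub.lower().startswith('order by ') and 'order' not in subexpression_dict.keys():
--             subexpression_dict['order'] = sub
--
--     # handle missing select
--     if 'select' not in subexpression_dict.keys():
--         subexpression_dict['select'] = 'SELECT *'
--
--     for key in categories:
--         if key in subexpression_dict.keys():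
--             res += ' ' + subexpression_dict[key]
--
--     res = res.strip()
--
--     return res
-- ===== SOURCE B (Python) =====
-- def simpleCompose(subs):
--     prefixes = ['select ', 'from ', 'where ', 'group by ', 'having ', 'order by ']
--     parts = []
--     for prefix in prefixes:
--         clause = next((s for s in subs if s.lower().startswith(prefix)), None)
--         if clause is None:
--             if prefix == 'select ':
--                 clause = 'SELECT *'
--             else:
--                 continue
--         parts.append(clause)
--     return ' '.join(parts).strip()
-- ===== Notes on version B (the rewrite author's own statement) =====
-- stated objective: alternative
-- what changed: Inverts the loop nesting: instead of a single classifying pass that fills a dict via a six-way elif chain and then re-reads it in canonical order, B iterates over the six canonical prefixes and scans subs for the first clause matching each, collecting parts and joining them.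
import Mathlib
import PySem

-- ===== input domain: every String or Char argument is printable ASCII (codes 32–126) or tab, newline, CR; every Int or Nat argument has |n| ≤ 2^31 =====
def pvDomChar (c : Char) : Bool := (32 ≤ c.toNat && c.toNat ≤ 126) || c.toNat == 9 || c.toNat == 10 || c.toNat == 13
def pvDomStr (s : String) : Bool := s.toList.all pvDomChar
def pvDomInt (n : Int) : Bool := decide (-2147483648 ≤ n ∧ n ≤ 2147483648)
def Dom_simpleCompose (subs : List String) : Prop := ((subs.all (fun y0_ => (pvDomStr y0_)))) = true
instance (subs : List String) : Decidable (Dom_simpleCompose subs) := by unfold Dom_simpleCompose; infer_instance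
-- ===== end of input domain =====

-- B inverts the loop nesting: canonical prefixes outer, first-match scan of subs inner,
-- replacing A's single classifying pass into a dict; same cost, alternative decomposition.


-- ===== PORT A =====
def pvCatsA : List String := ["select", "from", "where", "group", "having", "order"]

def pvClassifyA (d : PySem.Dict String String) (sub : String) : PySem.Dict String String :=
  if PySem.Str.startswith (PySem.Str.lower sub) "select " && !d.contains "select" then
    d.insert "select" sub
  else if PySem.Str.startswith (PySem.Str.lower sub) "from " && !d.contains "from" then
    d.insert "from" sub
  else if PySem.Str.startswith (PySem.Str.lower sub) "where " && !d.contains "where" then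
    d.insert "where" sub
  else if PySem.Str.startswith (PySem.Str.lower sub) "group by " && !d.contains "group" then
    d.insert "group" sub
  else if PySem.Str.startswith (PySem.Str.lower sub) "having " && !d.contains "having" then
    d.insert "having" sub
  else if PySem.Str.startswith (PySem.Str.lower sub) "order by " && !d.contains "order" then
    d.insert "order" sub
  else d

def simpleCompose (subs : List String) : String :=
  let d0 := subs.foldl pvClassifyA PySem.Dict.empty
  let d1 := if d0.contains "select" then d0 else d0.insert "select" "SELECT *"
  let res := pvCatsA.foldl (fun r k => if d1.contains k then r ++ " " ++ d1.getD k "" else r) ""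
  PySem.Str.strip res

-- ===== PORT B =====
def pvPrefixesB : List String := ["select ", "from ", "where ", "group by ", "having ", "order by "]

def pvFirstMatchB (subs : List String) (p : String) : Option String :=
  subs.find? (fun s => PySem.Str.startswith (PySem.Str.lower s) p)

def simpleCompose_alt (subs : List String) : String :=
  let parts := pvPrefixesB.foldl (fun parts p =>
    match pvFirstMatchB subs p with
    | some c => parts ++ [c]
    | none => if p = "select " then parts ++ ["SELECT *"] else parts) ([] : List String)
  PySem.Str.strip (PySem.Str.join " " parts)

-- ===== PRECONDITION & SPEC =====
def Spec_simpleCompose (subs : List String) (out : String) : Prop := out = simpleCompose_alt subs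
instance (subs : List String) (out : String) : Decidable (Spec_simpleCompose subs out) := by unfold Spec_simpleCompose; infer_instance

-- ===== CLAIM (what is proved, stated in full; the proofs are below) =====
def Claim_equal_simpleCompose : Prop := ∀ (subs : List String), Dom_simpleCompose subs → Spec_simpleCompose subs (simpleCompose subs)

-- ===== LEMMAS AND PROOFS =====

def pvPairs : List (String × String) :=
  [("select", "select "), ("from", "from "), ("where", "where "),
   ("group", "group by "), ("having", "having "), ("order", "order by ")]

-- two nonempty prefixes with distinct first characters cannot both match the same string
lemma pv_excl_false {s p q : String} {b c : Bool}
    (hpb : (PySem.Str.startswith s p && b) = true) (hqc : (PySem.Str.startswith s q && c) = true)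
    (hp0 : p.toList ≠ []) (hq0 : q.toList ≠ []) (hne : p.toList.head? ≠ q.toList.head?) : False := by
  have hp : PySem.Chars.startswith s.toList p.toList = true := by
    have := hpb; simp only [Bool.and_eq_true, PySem.Str.startswith] at this; exact this.1
  have hq : PySem.Chars.startswith s.toList q.toList = true := by
    have := hqc; simp only [Bool.and_eq_true, PySem.Str.startswith] at this; exact this.1
  have hps : p.toList <+: s.toList := (PySem.Chars.startswith_iff _ _).mp hp
  have hqs : q.toList <+: s.toList := (PySem.Chars.startswith_iff _ _).mp hq
  obtain ⟨t1, ht1⟩ := hps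
  obtain ⟨t2, ht2⟩ := hqs
  have h1 : s.toList.head? = p.toList.head? := by
    rw [← ht1, List.head?_append_of_ne_nil _ hp0]
  have h2 : s.toList.head? = q.toList.head? := by
    rw [← ht2, List.head?_append_of_ne_nil _ hq0]
  exact hne (h1 ▸ h2)

lemma step_get (d : PySem.Dict String String) (sub : String) (k p : String)
    (hk : (k, p) ∈ pvPairs) :
    (pvClassifyA d sub).get? k =
      if PySem.Str.startswith (PySem.Str.lower sub) p && !d.contains k then some sub
      else d.get? k := by
  fin_cases hk <;> simp only [pvClassifyA] <;> split_ifs with h1 h2 h3 h4 h5 h6 h7 h8 h9 h10 h11 <;>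
    try (simp_all [PySem.Dict.get?_insert_self, PySem.Dict.get?_insert]; done)
  all_goals exfalso
  all_goals first
    | exact pv_excl_false h1 h2 (by decide) (by decide) (by decide)
    | exact pv_excl_false h1 h3 (by decide) (by decide) (by decide)
    | exact pv_excl_false h1 h4 (by decide) (by decide) (by decide)
    | exact pv_excl_false h1 h5 (by decide) (by decide) (by decide)
    | exact pv_excl_false h1 h6 (by decide) (by decide) (by decide)
    | exact pv_excl_false h1 h7 (by decide) (by decide) (by decide)
    | exact pv_excl_false h1 h8 (by decide) (by decide) (by decide)
    | exact pv_excl_false h1 h9 (by decide) (by decide) (by decide)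
    | exact pv_excl_false h1 h10 (by decide) (by decide) (by decide)
    | exact pv_excl_false h1 h11 (by decide) (by decide) (by decide)
    | exact pv_excl_false h2 h1 (by decide) (by decide) (by decide)
    | exact pv_excl_false h2 h3 (by decide) (by decide) (by decide)
    | exact pv_excl_false h2 h4 (by decide) (by decide) (by decide)
    | exact pv_excl_false h2 h5 (by decide) (by decide) (by decide)
    | exact pv_excl_false h2 h6 (by decide) (by decide) (by decide)
    | exact pv_excl_false h2 h7 (by decide) (by decide) (by decide)
    | exact pv_excl_false h2 h8 (by decide) (by decide) (by decide)
    | exact pv_excl_false h2 h9 (by decide) (by decide) (by decide)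
    | exact pv_excl_false h2 h10 (by decide) (by decide) (by decide)
    | exact pv_excl_false h2 h11 (by decide) (by decide) (by decide)
    | exact pv_excl_false h3 h1 (by decide) (by decide) (by decide)
    | exact pv_excl_false h3 h2 (by decide) (by decide) (by decide)
    | exact pv_excl_false h3 h4 (by decide) (by decide) (by decide)
    | exact pv_excl_false h3 h5 (by decide) (by decide) (by decide)
    | exact pv_excl_false h3 h6 (by decide) (by decide) (by decide)
    | exact pv_excl_false h3 h7 (by decide) (by decide) (by decide)
    | exact pv_excl_false h3 h8 (by decide) (by decide) (by decide)
    | exact pv_excl_false h3 h9 (by decide) (by decide) (by decide)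
    | exact pv_excl_false h3 h10 (by decide) (by decide) (by decide)
    | exact pv_excl_false h3 h11 (by decide) (by decide) (by decide)
    | exact pv_excl_false h4 h1 (by decide) (by decide) (by decide)
    | exact pv_excl_false h4 h2 (by decide) (by decide) (by decide)
    | exact pv_excl_false h4 h3 (by decide) (by decide) (by decide)
    | exact pv_excl_false h4 h5 (by decide) (by decide) (by decide)
    | exact pv_excl_false h4 h6 (by decide) (by decide) (by decide)
    | exact pv_excl_false h4 h7 (by decide) (by decide) (by decide)
    | exact pv_excl_false h4 h8 (by decide) (by decide) (by decide)
    | exact pv_excl_false h4 h9 (by decide) (by decide) (by decide)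
    | exact pv_excl_false h4 h10 (by decide) (by decide) (by decide)
    | exact pv_excl_false h4 h11 (by decide) (by decide) (by decide)
    | exact pv_excl_false h5 h1 (by decide) (by decide) (by decide)
    | exact pv_excl_false h5 h2 (by decide) (by decide) (by decide)
    | exact pv_excl_false h5 h3 (by decide) (by decide) (by decide)
    | exact pv_excl_false h5 h4 (by decide) (by decide) (by decide)
    | exact pv_excl_false h5 h6 (by decide) (by decide) (by decide)
    | exact pv_excl_false h5 h7 (by decide) (by decide) (by decide)
    | exact pv_excl_false h5 h8 (by decide) (by decide) (by decide)
    | exact pv_excl_false h5 h9 (by decide) (by decide) (by decide)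
    | exact pv_excl_false h5 h10 (by decide) (by decide) (by decide)
    | exact pv_excl_false h5 h11 (by decide) (by decide) (by decide)
    | exact pv_excl_false h6 h1 (by decide) (by decide) (by decide)
    | exact pv_excl_false h6 h2 (by decide) (by decide) (by decide)
    | exact pv_excl_false h6 h3 (by decide) (by decide) (by decide)
    | exact pv_excl_false h6 h4 (by decide) (by decide) (by decide)
    | exact pv_excl_false h6 h5 (by decide) (by decide) (by decide)
    | exact pv_excl_false h6 h7 (by decide) (by decide) (by decide)
    | exact pv_excl_false h6 h8 (by decide) (by decide) (by decide)
    | exact pv_excl_false h6 h9 (by decide) (by decide) (by decide)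
    | exact pv_excl_false h6 h10 (by decide) (by decide) (by decide)
    | exact pv_excl_false h6 h11 (by decide) (by decide) (by decide)
    | exact pv_excl_false h7 h1 (by decide) (by decide) (by decide)
    | exact pv_excl_false h7 h2 (by decide) (by decide) (by decide)
    | exact pv_excl_false h7 h3 (by decide) (by decide) (by decide)
    | exact pv_excl_false h7 h4 (by decide) (by decide) (by decide)
    | exact pv_excl_false h7 h5 (by decide) (by decide) (by decide)
    | exact pv_excl_false h7 h6 (by decide) (by decide) (by decide)
    | exact pv_excl_false h7 h8 (by decide) (by decide) (by decide)
    | exact pv_excl_false h7 h9 (by decide) (by decide) (by decide)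
    | exact pv_excl_false h7 h10 (by decide) (by decide) (by decide)
    | exact pv_excl_false h7 h11 (by decide) (by decide) (by decide)
    | exact pv_excl_false h8 h1 (by decide) (by decide) (by decide)
    | exact pv_excl_false h8 h2 (by decide) (by decide) (by decide)
    | exact pv_excl_false h8 h3 (by decide) (by decide) (by decide)
    | exact pv_excl_false h8 h4 (by decide) (by decide) (by decide)
    | exact pv_excl_false h8 h5 (by decide) (by decide) (by decide)
    | exact pv_excl_false h8 h6 (by decide) (by decide) (by decide)
    | exact pv_excl_false h8 h7 (by decide) (by decide) (by decide)
    | exact pv_excl_false h8 h9 (by decide) (by decide) (by decide)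
    | exact pv_excl_false h8 h10 (by decide) (by decide) (by decide)
    | exact pv_excl_false h8 h11 (by decide) (by decide) (by decide)
    | exact pv_excl_false h9 h1 (by decide) (by decide) (by decide)
    | exact pv_excl_false h9 h2 (by decide) (by decide) (by decide)
    | exact pv_excl_false h9 h3 (by decide) (by decide) (by decide)
    | exact pv_excl_false h9 h4 (by decide) (by decide) (by decide)
    | exact pv_excl_false h9 h5 (by decide) (by decide) (by decide)
    | exact pv_excl_false h9 h6 (by decide) (by decide) (by decide)
    | exact pv_excl_false h9 h7 (by decide) (by decide) (by decide)
    | exact pv_excl_false h9 h8 (by decide) (by decide) (by decide)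
    | exact pv_excl_false h9 h10 (by decide) (by decide) (by decide)
    | exact pv_excl_false h9 h11 (by decide) (by decide) (by decide)
    | exact pv_excl_false h10 h1 (by decide) (by decide) (by decide)
    | exact pv_excl_false h10 h2 (by decide) (by decide) (by decide)
    | exact pv_excl_false h10 h3 (by decide) (by decide) (by decide)
    | exact pv_excl_false h10 h4 (by decide) (by decide) (by decide)
    | exact pv_excl_false h10 h5 (by decide) (by decide) (by decide)
    | exact pv_excl_false h10 h6 (by decide) (by decide) (by decide)
    | exact pv_excl_false h10 h7 (by decide) (by decide) (by decide)
    | exact pv_excl_false h10 h8 (by decide) (by decide) (by decide)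
    | exact pv_excl_false h10 h9 (by decide) (by decide) (by decide)
    | exact pv_excl_false h10 h11 (by decide) (by decide) (by decide)
    | exact pv_excl_false h11 h1 (by decide) (by decide) (by decide)
    | exact pv_excl_false h11 h2 (by decide) (by decide) (by decide)
    | exact pv_excl_false h11 h3 (by decide) (by decide) (by decide)
    | exact pv_excl_false h11 h4 (by decide) (by decide) (by decide)
    | exact pv_excl_false h11 h5 (by decide) (by decide) (by decide)
    | exact pv_excl_false h11 h6 (by decide) (by decide) (by decide)
    | exact pv_excl_false h11 h7 (by decide) (by decide) (by decide)
    | exact pv_excl_false h11 h8 (by decide) (by decide) (by decide)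
    | exact pv_excl_false h11 h9 (by decide) (by decide) (by decide)
    | exact pv_excl_false h11 h10 (by decide) (by decide) (by decide)

lemma fold_get (subs : List String) (d : PySem.Dict String String) (k p : String)
    (hk : (k, p) ∈ pvPairs) :
    (subs.foldl pvClassifyA d).get? k = (d.get? k).or (pvFirstMatchB subs p) := by
  induction subs generalizing d with
  | nil => simp [pvFirstMatchB]
  | cons s rest ih =>
    simp only [List.foldl_cons]
    rw [ih (pvClassifyA d s), step_get d s k p hk]
    by_cases hsw : PySem.Chars.startswith (PySem.Chars.lower s.toList) p.toList = true
    · by_cases hc : d.contains k = true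
      · obtain ⟨v, hv⟩ : ∃ v, d.get? k = some v := by
          rcases h : d.get? k with _ | v
          · rw [PySem.Dict.get?_eq_none_iff_contains] at h; rw [h] at hc; simp at hc
          · exact ⟨v, rfl⟩
        simp [hc, hv]
      · have hc' : d.contains k = false := by simpa using hc
        have hn : d.get? k = none := (PySem.Dict.get?_eq_none_iff_contains d k).mpr hc'
        simp [pvFirstMatchB, hsw, hc', hn, List.find?_cons_of_pos]
    · have hsw' : PySem.Chars.startswith (PySem.Chars.lower s.toList) p.toList = false := by
        simpa using hsw
      simp [pvFirstMatchB, hsw', List.find?_cons_of_neg]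

lemma strip_space_cons (l : List Char) : PySem.Chars.strip (' ' :: l) = PySem.Chars.strip l := by
  simp [PySem.Chars.strip, PySem.Chars.lstrip, show PySem.Chars.isspace ' ' = true from by decide]

lemma main_eq (subs : List String) : simpleCompose subs = simpleCompose_alt subs := by
  have hsel := fold_get subs PySem.Dict.empty "select" "select " (by simp [pvPairs])
  have hfr := fold_get subs PySem.Dict.empty "from" "from " (by simp [pvPairs])
  have hwh := fold_get subs PySem.Dict.empty "where" "where " (by simp [pvPairs])
  have hgr := fold_get subs PySem.Dict.empty "group" "group by " (by simp [pvPairs])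
  have hhv := fold_get subs PySem.Dict.empty "having" "having " (by simp [pvPairs])
  have hor := fold_get subs PySem.Dict.empty "order" "order by " (by simp [pvPairs])
  simp only [PySem.Dict.get?_empty, Option.none_or] at hsel hfr hwh hgr hhv hor
  have e2 : (" ".toList : List Char) = [' '] := rfl
  rcases hs : pvFirstMatchB subs "select " with _ | vs
  · -- no select clause: A inserts the default
    have hcs : (subs.foldl pvClassifyA PySem.Dict.empty).contains "select" = false := by
      rw [hs] at hsel
      exact (PySem.Dict.get?_eq_none_iff_contains _ _).mp hsel
    have gsel : ((subs.foldl pvClassifyA PySem.Dict.empty).insert "select" "SELECT *").get? "select"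
        = some "SELECT *" := PySem.Dict.get?_insert_self _ _ _
    have gf : ((subs.foldl pvClassifyA PySem.Dict.empty).insert "select" "SELECT *").get? "from"
        = pvFirstMatchB subs "from " := by
      rw [PySem.Dict.get?_insert_of_ne _ _ (by decide), hfr]
    have gw : ((subs.foldl pvClassifyA PySem.Dict.empty).insert "select" "SELECT *").get? "where"
        = pvFirstMatchB subs "where " := by
      rw [PySem.Dict.get?_insert_of_ne _ _ (by decide), hwh]
    have gg : ((subs.foldl pvClassifyA PySem.Dict.empty).insert "select" "SELECT *").get? "group"
        = pvFirstMatchB subs "group by " := by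
      rw [PySem.Dict.get?_insert_of_ne _ _ (by decide), hgr]
    have gh : ((subs.foldl pvClassifyA PySem.Dict.empty).insert "select" "SELECT *").get? "having"
        = pvFirstMatchB subs "having " := by
      rw [PySem.Dict.get?_insert_of_ne _ _ (by decide), hhv]
    have go : ((subs.foldl pvClassifyA PySem.Dict.empty).insert "select" "SELECT *").get? "order"
        = pvFirstMatchB subs "order by " := by
      rw [PySem.Dict.get?_insert_of_ne _ _ (by decide), hor]
    rcases hf : pvFirstMatchB subs "from " with _ | v2 <;>
    rcases hw : pvFirstMatchB subs "where " with _ | v3 <;>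
    rcases hg : pvFirstMatchB subs "group by " with _ | v4 <;>
    rcases hh : pvFirstMatchB subs "having " with _ | v5 <;>
    rcases ho : pvFirstMatchB subs "order by " with _ | v6 <;>
      (rw [← String.toList_inj]
       simp [simpleCompose, simpleCompose_alt, pvCatsA, pvPrefixesB, hcs, hs, hf, hw, hg, hh, ho,
             PySem.Dict.contains_eq_isSome_get?, PySem.Dict.getD_eq_get?_getD,
             gsel, gf, gw, gg, gh, go, e2,
             PySem.Str.toList_strip, PySem.Str.toList_join, String.toList_append,
             PySem.Chars.join_cons_cons, PySem.Chars.join_singleton, strip_space_cons])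
  · -- a select clause was found
    have hcs : (subs.foldl pvClassifyA PySem.Dict.empty).contains "select" = true := by
      rw [PySem.Dict.contains_eq_isSome_get?, hsel, hs]; rfl
    have gsel : (subs.foldl pvClassifyA PySem.Dict.empty).get? "select" = some vs := by
      rw [hsel, hs]
    rcases hf : pvFirstMatchB subs "from " with _ | v2 <;>
    rcases hw : pvFirstMatchB subs "where " with _ | v3 <;>
    rcases hg : pvFirstMatchB subs "group by " with _ | v4 <;>
    rcases hh : pvFirstMatchB subs "having " with _ | v5 <;>
    rcases ho : pvFirstMatchB subs "order by " with _ | v6 <;>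
      (rw [← String.toList_inj]
       simp [simpleCompose, simpleCompose_alt, pvCatsA, pvPrefixesB, hcs, hs, hf, hw, hg, hh, ho,
             PySem.Dict.contains_eq_isSome_get?, PySem.Dict.getD_eq_get?_getD,
             gsel, hfr, hwh, hgr, hhv, hor, e2,
             PySem.Str.toList_strip, PySem.Str.toList_join, String.toList_append,
             PySem.Chars.join_cons_cons, PySem.Chars.join_singleton, strip_space_cons])

-- ===== VERDICT (by name: the statement is the Claim_ definition above) =====
theorem simpleCompose_spec : Claim_equal_simpleCompose := by
  intro subs _
  unfold Spec_simpleCompose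
  exact main_eq subs
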